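-- pv_equiv track=rewrite | github.com/AngheloAlf/CIAC-Conglomerado-de-ejercicios | ejercicios/21 conjuntos/09 - Antiterroristas/Code/p1.py | terroristasPeligrosos
-- ===== SOURCE A (Python) =====
-- def seConocen(terroristas, terro1, terro2):
--     if terro1 not in terroristas or terro2 not in terroristas:
--         return False
--     datos1 = terroristas[terro1]
--     datos2 = terroristas[terro2]
--     for i in datos1:
--         if i in datos2:
--             return True
--     return False
--
-- def habilidadesUnicas(habilidades):
--     habUni = dict()
--     for codigo, listaHabilidades in habilidades.items():
--         habUni[codigo] = dict()
--         for hab in listaHabilidades: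
--             habUni[codigo][hab] = 0
--             for codigo2, lista2 in habilidades.items():
--                 if codigo != codigo2 and hab in lista2:
--                     habUni[codigo][hab] += 1
--
--     habiRetornar = dict()
--     for cod, diccHabilidades in habUni.items():
--         habiRetornar[cod] = set()
--         for hab, cantidad in diccHabilidades.items():
--             if cantidad == 0:
--                 habiRetornar[cod].add(hab)
--
--     return habiRetornar
--
-- def terroristasPeligrosos(terroristas, habilidades):
--     habUnicas = habilidadesUnicas(habilidades)
--     peligrosos = dict()
--     for cod, conjuntoHab in habUnicas.items():
--         if len(conjuntoHab) != 0:
--             peligrosos[cod] = True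
--             for otro in terroristas.keys():
--                 if cod != otro and seConocen(terroristas, cod, otro):
--                     peligrosos[cod] = False
--     return peligrosos
-- ===== SOURCE B (Python) =====
-- def terroristasPeligrosos(terroristas, habilidades):
--     # how many codes in habilidades hold each skill (each code counted once)
--     owners = {}
--     for code, skills in habilidades.items():
--         for h in set(skills):
--             owners[h] = owners.get(h, 0) + 1
--     # inverted index over terroristas: skill -> set of codes having it
--     index = {}
--     for code, skills in terroristas.items():
--         for h in skills:
--             index.setdefault(h, set()).add(code)
--     result = {}
--     for code, skills in habilidades.items():
--         if any(owners[h] == 1 for h in skills):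
--             result[code] = all(index.get(h, set()) <= {code}
--                                for h in terroristas.get(code, []))
--     return result
-- ===== Notes on version B (the rewrite author's own statement) =====
-- stated objective: faster
-- what changed: Replaces the per-(code,skill) rescan of all codes and the all-pairs seConocen acquaintance test by two hash structures built in one pass each: a skill->owner-count map over habilidades and an inverted skill->codes index over terroristas; each candidate is then decided by direct lookups.
import Mathlib
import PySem

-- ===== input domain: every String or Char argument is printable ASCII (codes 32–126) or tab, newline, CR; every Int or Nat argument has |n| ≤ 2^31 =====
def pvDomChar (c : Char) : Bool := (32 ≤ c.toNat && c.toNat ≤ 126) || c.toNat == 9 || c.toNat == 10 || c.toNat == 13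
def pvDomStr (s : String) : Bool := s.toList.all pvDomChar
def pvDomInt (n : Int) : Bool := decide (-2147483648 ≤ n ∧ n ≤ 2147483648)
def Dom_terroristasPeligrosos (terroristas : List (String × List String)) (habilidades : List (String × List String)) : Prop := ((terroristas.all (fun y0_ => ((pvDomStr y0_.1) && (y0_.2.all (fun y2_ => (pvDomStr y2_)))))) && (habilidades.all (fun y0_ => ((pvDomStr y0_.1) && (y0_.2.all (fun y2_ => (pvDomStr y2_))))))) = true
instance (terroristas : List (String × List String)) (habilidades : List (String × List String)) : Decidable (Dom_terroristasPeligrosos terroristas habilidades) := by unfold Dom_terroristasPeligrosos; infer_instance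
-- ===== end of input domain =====

-- B replaces A's per-(code,skill) rescans and all-pairs seConocen test by a skill->owner-count
-- map and an inverted skill->codes index, each built in one pass (objective: faster).

-- ===== PORT A =====
def seConocen (terroristas : PySem.Dict String (List String)) (terro1 terro2 : String) : Bool :=
  if !terroristas.contains terro1 || !terroristas.contains terro2 then false
  else
    let datos1 := terroristas.getD terro1 []
    let datos2 := terroristas.getD terro2 []
    -- 'for i in datos1: if i in datos2: return True / return False' = any
    datos1.any (fun i => datos2.contains i)

def habilidadesUnicas (habilidades : PySem.Dict String (List String)) :
    PySem.Dict String (PySem.Set String) :=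
  let habUni : PySem.Dict String (PySem.Dict String Int) :=
    habilidades.items.foldl (fun habUni cl =>
      let habUni := habUni.insert cl.1 PySem.Dict.empty
      cl.2.foldl (fun habUni hab =>
        let habUni := habUni.insert cl.1 ((habUni.getD cl.1 PySem.Dict.empty).insert hab 0)
        habilidades.items.foldl (fun habUni c2 =>
          if cl.1 != c2.1 && c2.2.contains hab then
            habUni.insert cl.1 ((habUni.getD cl.1 PySem.Dict.empty).modify hab 0 (· + 1))
          else habUni) habUni) habUni) PySem.Dict.empty
  habUni.items.foldl (fun habiRetornar cd =>
    let habiRetornar := habiRetornar.insert cd.1 PySem.Set.empty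
    cd.2.items.foldl (fun habiRetornar hc =>
      if hc.2 == 0 then
        habiRetornar.insert cd.1 (PySem.Set.add (habiRetornar.getD cd.1 PySem.Set.empty) hc.1)
      else habiRetornar) habiRetornar) PySem.Dict.empty

def terroristasPeligrosos (terroristas : List (String × List String)) (habilidades : List (String × List String)) : List (String × Bool) :=
  let td := PySem.Dict.ofList terroristas
  let habUnicas := habilidadesUnicas (PySem.Dict.ofList habilidades)
  (habUnicas.items.foldl (fun peligrosos cc =>
    if cc.2.length ≠ 0 then
      let peligrosos := peligrosos.insert cc.1 true
      td.keys.foldl (fun peligrosos otro =>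
        if cc.1 != otro && seConocen td cc.1 otro then peligrosos.insert cc.1 false
        else peligrosos) peligrosos
    else peligrosos) PySem.Dict.empty).items

-- ===== PORT B =====
def terroristasPeligrosos_alt (terroristas : List (String × List String)) (habilidades : List (String × List String)) : List (String × Bool) :=
  let td := PySem.Dict.ofList terroristas
  let hd := PySem.Dict.ofList habilidades
  let owners : PySem.Dict String Int :=
    hd.items.foldl (fun owners cs =>
      (PySem.Set.ofList cs.2).foldl (fun owners h => owners.modify h 0 (· + 1)) owners)
      PySem.Dict.empty
  let index : PySem.Dict String (PySem.Set String) :=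
    td.items.foldl (fun index cs =>
      cs.2.foldl (fun index h => index.modify h PySem.Set.empty (fun s => PySem.Set.add s cs.1)) index)
      PySem.Dict.empty
  (hd.items.foldl (fun result cs =>
    if cs.2.any (fun h => owners.getD h 0 == 1) then
      result.insert cs.1 ((td.getD cs.1 []).all (fun h =>
        PySem.Set.issubset (index.getD h PySem.Set.empty) [cs.1]))
    else result) PySem.Dict.empty).items

-- ===== PRECONDITION & SPEC =====
def Spec_terroristasPeligrosos (terroristas : List (String × List String)) (habilidades : List (String × List String)) (out : List (String × Bool)) : Prop := out = terroristasPeligrosos_alt terroristas habilidades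
instance (terroristas : List (String × List String)) (habilidades : List (String × List String)) (out : List (String × Bool)) : Decidable (Spec_terroristasPeligrosos terroristas habilidades out) := by unfold Spec_terroristasPeligrosos; infer_instance

-- ===== CLAIM (what is proved, stated in full; the proofs are below) =====
def Claim_equal_terroristasPeligrosos : Prop := ∀ (terroristas : List (String × List String)) (habilidades : List (String × List String)), Dom_terroristasPeligrosos terroristas habilidades → Spec_terroristasPeligrosos terroristas habilidades (terroristasPeligrosos terroristas habilidades)

-- ===== LEMMAS AND PROOFS =====

-- proof-only abbreviations (A's intermediate values in closed form)
def cntOthers (L : List (String × List String)) (cod hab : String) : Int :=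
  (L.countP (fun c2 => cod != c2.1 && c2.2.contains hab) : Int)

def innerA (L : List (String × List String)) (cod : String) (lista : List String) :
    PySem.Dict String Int :=
  lista.foldl (fun d hab => d.insert hab (cntOthers L cod hab)) PySem.Dict.empty

def uniqSetOf (dh : PySem.Dict String Int) : PySem.Set String :=
  dh.items.foldl (fun s hc => if hc.2 == 0 then PySem.Set.add s hc.1 else s) PySem.Set.empty

def dangA (td : PySem.Dict String (List String)) (cod : String) : Bool :=
  !(td.keys.any (fun otro => cod != otro && seConocen td cod otro))

def dangB (td : PySem.Dict String (List String)) (cod : String) : Bool :=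
  (td.getD cod []).all (fun h =>
    PySem.Set.issubset (PySem.Set.ofList ((td.items.filter (fun q => q.2.contains h)).map (·.1))) [cod])

-- generic collapse: a loop whose every step only rewrites key k of the dict
theorem foldl_insert_fun_collapse {κ ν α : Type} [BEq κ] [LawfulBEq κ]
    (l : List α) (body : PySem.Dict κ ν → α → PySem.Dict κ ν) (F : α → ν → ν) (k : κ)
    (hbody : ∀ (hu : PySem.Dict κ ν) (v : ν) (x : α), body (hu.insert k v) x = hu.insert k (F x v))
    (hu : PySem.Dict κ ν) (v0 : ν) :
    l.foldl body (hu.insert k v0) = hu.insert k (l.foldl (fun v x => F x v) v0) := by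
  induction l generalizing v0 with
  | nil => rfl
  | cons a t ih => simp only [List.foldl_cons, hbody]; exact ih _

theorem modify_insert_self {κ ν : Type} [BEq κ] [LawfulBEq κ]
    (d : PySem.Dict κ ν) (k : κ) (v d0 : ν) (f : ν → ν) :
    (d.insert k v).modify k d0 f = d.insert k (f v) := by
  simp [PySem.Dict.modify, PySem.Dict.getD_insert_self, PySem.Dict.insert_insert_self]

theorem cnt_from_insert {α : Type} (L : List α) (p : α → Bool) (d : PySem.Dict String Int)
    (hab : String) (v : Int) :
    L.foldl (fun d c2 => if p c2 then d.modify hab 0 (· + 1) else d) (d.insert hab v)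
      = d.insert hab (v + (L.countP p : Int)) := by
  induction L generalizing v with
  | nil => simp
  | cons a t ih =>
    simp only [List.foldl_cons, List.countP_cons]
    by_cases h : p a
    · simp only [h, if_pos, modify_insert_self, ih]
      congr 1; push_cast; ring
    · simp [h, ih]

theorem items_foldl_insert_keyfun {κ ν : Type} [BEq κ] [LawfulBEq κ] [DecidableEq κ]
    (l : List κ) (v : κ → ν) (s : List κ) (d : PySem.Dict κ ν)
    (hitems : d.items = s.map (fun k => (k, v k))) (hs : s.Nodup) :
    (l.foldl (fun d hab => d.insert hab (v hab)) d).items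
      = (PySem.Set.update s l).map (fun k => (k, v k)) := by
  induction l generalizing s d with
  | nil => simpa [PySem.Set.update] using hitems
  | cons a t ih =>
    have hkeys : d.keys = s := by
      simp [PySem.Dict.keys, hitems, List.map_map, Function.comp_def]
    have hcont : d.contains a = decide (a ∈ s) := by
      rw [PySem.Dict.contains_eq_decide_mem_keys, hkeys]
    simp only [List.foldl_cons, PySem.Set.update, List.foldl_cons]
    by_cases hmem : a ∈ s
    · have h1 : (d.insert a (v a)).items = s.map (fun k => (k, v k)) := by
        rw [PySem.Dict.items_insert_of_contains _ _ (by simp [hcont, hmem]), hitems]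
        rw [List.map_map]
        apply List.map_congr_left
        intro k hk
        by_cases hka : k = a <;> simp [hka]
      have hadd : PySem.Set.add s a = s := by simp [PySem.Set.add, PySem.Set.contains, hmem]
      rw [hadd]
      exact ih s (d.insert a (v a)) h1 hs
    · have h1 : (d.insert a (v a)).items = (s ++ [a]).map (fun k => (k, v k)) := by
        rw [PySem.Dict.items_insert_of_not_contains _ _ (by simp [hcont, hmem]), hitems]
        simp
      have hadd : PySem.Set.add s a = s ++ [a] := by simp [PySem.Set.add, PySem.Set.contains, hmem]
      rw [hadd]
      exact ih (s ++ [a]) _ h1 (by simp [List.nodup_append, hs]; exact fun x hx hxa => hmem (hxa ▸ hx))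

theorem set_update_nil {α : Type} [BEq α] (l : List α) :
    PySem.Set.update [] l = PySem.Set.ofList l := by
  simp [PySem.Set.update, PySem.Set.ofList_eq_foldl]

theorem count_ofList (l : List String) (x : String) :
    (PySem.Set.ofList l).count x = if x ∈ l then 1 else 0 := by
  by_cases h : x ∈ l
  · simp [h]
  · simp [h, List.count_eq_zero.mpr (fun hc => h ((PySem.Set.mem_ofList l x).mp hc))]

theorem owners_getD (L : List (String × List String)) (o0 : PySem.Dict String Int) (h : String) :
    (L.foldl (fun o cs => (PySem.Set.ofList cs.2).foldl (fun o x => o.modify x 0 (· + 1)) o) o0).getD h 0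
      = o0.getD h 0 + (L.countP (fun cs => cs.2.contains h) : Int) := by
  induction L generalizing o0 with
  | nil => simp
  | cons a t ih =>
    simp only [List.foldl_cons, ih, PySem.Dict.getD_foldl_modify_add_one, count_ofList,
      List.countP_cons]
    by_cases hm : h ∈ a.2
    · simp [hm]; ring
    · simp [hm]

theorem index_inner (sk : List String) (c : String) (ix : PySem.Dict String (PySem.Set String))
    (h : String) :
    (sk.foldl (fun ix x => ix.modify x PySem.Set.empty (fun s => PySem.Set.add s c)) ix).getD h PySem.Set.empty
      = if h ∈ sk then PySem.Set.add (ix.getD h PySem.Set.empty) c else ix.getD h PySem.Set.empty := by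
  induction sk generalizing ix with
  | nil => simp
  | cons a t ih =>
    simp only [List.foldl_cons, ih, PySem.Dict.getD_modify, List.mem_cons]
    by_cases hha : h = a
    · subst hha
      by_cases ht : h ∈ t <;> simp [ht]
    · by_cases ht : h ∈ t <;> simp [hha, ht]

theorem index_getD (L : List (String × List String)) (ix0 : PySem.Dict String (PySem.Set String))
    (h : String) :
    (L.foldl (fun ix cs => cs.2.foldl (fun ix x => ix.modify x PySem.Set.empty (fun s => PySem.Set.add s cs.1)) ix) ix0).getD h PySem.Set.empty
      = (L.filter (fun q => q.2.contains h)).foldl (fun s q => PySem.Set.add s q.1) (ix0.getD h PySem.Set.empty) := by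
  induction L generalizing ix0 with
  | nil => simp
  | cons a t ih =>
    simp only [List.foldl_cons, ih, index_inner, List.filter_cons]
    by_cases hm : h ∈ a.2
    · simp [hm]
    · simp [hm]

-- fold of Set.add from empty, keyed through a projection, is Set.ofList of the projections
theorem foldl_set_add_ofList {α : Type} (X : List α)
    (f : α → String) :
    X.foldl (fun s q => PySem.Set.add s (f q)) [] = PySem.Set.ofList (X.map f) := by
  rw [PySem.Set.ofList_eq_foldl, ← List.foldl_map]

theorem ofList_eq_nil_iff {α : Type} [BEq α] [LawfulBEq α] (l : List α) :
    PySem.Set.ofList l = [] ↔ l = [] := by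
  constructor
  · intro h
    cases l with
    | nil => rfl
    | cons a t =>
      exfalso
      have : a ∈ PySem.Set.ofList (a :: t) := (PySem.Set.mem_ofList _ _).mpr (by simp)
      simp [h] at this
  · intro h; simp [h, PySem.Set.ofList]

-- A's habilidadesUnicas, characterized
theorem habUni_items (hd : PySem.Dict String (List String)) (hnd : hd.keys.Nodup) :
    (habilidadesUnicas hd).items
      = hd.items.map (fun p => (p.1, uniqSetOf (innerA hd.items p.1 p.2))) := by
  unfold habilidadesUnicas
  dsimp only
  have hstep1 : ∀ (hu : PySem.Dict String (PySem.Dict String Int)) (cl : String × List String),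
      List.foldl
        (fun habUni hab =>
          List.foldl
            (fun habUni c2 =>
              if (cl.1 != c2.1 && c2.2.contains hab) = true then
                habUni.insert cl.1 ((habUni.getD cl.1 PySem.Dict.empty).modify hab 0 fun x => x + 1)
              else habUni)
            (habUni.insert cl.1 ((habUni.getD cl.1 PySem.Dict.empty).insert hab 0)) hd.items)
        (hu.insert cl.1 PySem.Dict.empty) cl.2
      = hu.insert cl.1 (innerA hd.items cl.1 cl.2) := by
    intro hu cl
    have hb1 : ∀ (base : PySem.Dict String (PySem.Dict String Int)) (v : PySem.Dict String Int) (hab : String),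
        List.foldl
          (fun habUni c2 =>
            if (cl.1 != c2.1 && c2.2.contains hab) = true then
              habUni.insert cl.1 ((habUni.getD cl.1 PySem.Dict.empty).modify hab 0 fun x => x + 1)
            else habUni)
          ((base.insert cl.1 v).insert cl.1 (((base.insert cl.1 v).getD cl.1 PySem.Dict.empty).insert hab 0)) hd.items
        = base.insert cl.1 (v.insert hab (cntOthers hd.items cl.1 hab)) := by
      intro base v hab
      rw [PySem.Dict.getD_insert_self, PySem.Dict.insert_insert_self]
      have hb2 : ∀ (base' : PySem.Dict String (PySem.Dict String Int)) (v' : PySem.Dict String Int) (c2 : String × List String),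
          (fun habUni c2 =>
            if (cl.1 != c2.1 && c2.2.contains hab) = true then
              habUni.insert cl.1 ((habUni.getD cl.1 PySem.Dict.empty).modify hab 0 fun x => x + 1)
            else habUni) (base'.insert cl.1 v') c2
          = base'.insert cl.1 (if (cl.1 != c2.1 && c2.2.contains hab) = true then v'.modify hab 0 (· + 1) else v') := by
        intro base' v' c2
        by_cases hc : (cl.1 != c2.1 && c2.2.contains hab) = true
        · simp only [hc, if_true, PySem.Dict.getD_insert_self, PySem.Dict.insert_insert_self]
        · simp only [if_neg hc]
      rw [foldl_insert_fun_collapse hd.items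
          (fun habUni c2 =>
            if (cl.1 != c2.1 && c2.2.contains hab) = true then
              habUni.insert cl.1 ((habUni.getD cl.1 PySem.Dict.empty).modify hab 0 fun x => x + 1)
            else habUni)
          (fun c2 v' => if (cl.1 != c2.1 && c2.2.contains hab) = true then v'.modify hab 0 (· + 1) else v')
          cl.1 hb2 base (v.insert hab 0)]
      rw [cnt_from_insert hd.items (fun c2 => cl.1 != c2.1 && c2.2.contains hab) v hab 0]
      simp [cntOthers]
    exact foldl_insert_fun_collapse cl.2
      (fun habUni hab =>
        List.foldl
          (fun habUni c2 =>
            if (cl.1 != c2.1 && c2.2.contains hab) = true then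
              habUni.insert cl.1 ((habUni.getD cl.1 PySem.Dict.empty).modify hab 0 fun x => x + 1)
            else habUni)
          (habUni.insert cl.1 ((habUni.getD cl.1 PySem.Dict.empty).insert hab 0)) hd.items)
      (fun hab v => v.insert hab (cntOthers hd.items cl.1 hab)) cl.1 hb1 hu PySem.Dict.empty
  have hs1 :
      List.foldl
        (fun habUni cl =>
          List.foldl
            (fun habUni hab =>
              List.foldl
                (fun habUni c2 =>
                  if (cl.1 != c2.1 && c2.2.contains hab) = true then
                    habUni.insert cl.1 ((habUni.getD cl.1 PySem.Dict.empty).modify hab 0 fun x => x + 1)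
                  else habUni)
                (habUni.insert cl.1 ((habUni.getD cl.1 PySem.Dict.empty).insert hab 0)) hd.items)
            (habUni.insert cl.1 PySem.Dict.empty) cl.2)
        PySem.Dict.empty hd.items
      = List.foldl (fun hu cl => hu.insert cl.1 (innerA hd.items cl.1 cl.2)) PySem.Dict.empty hd.items :=
    PySem.List.foldl_congr_mem _ _ _ _ (fun hu cl _ => hstep1 hu cl)
  rw [hs1]
  have hnd' : (hd.items.map (fun cl => cl.1)).Nodup := hnd
  rw [PySem.Dict.items_foldl_insert_fresh hd.items (fun cl => cl.1)
    (fun cl => innerA hd.items cl.1 cl.2) PySem.Dict.empty (fun a _ => by simp) hnd']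
  have hstep2 : ∀ (hr : PySem.Dict String (PySem.Set String)) (cd : String × PySem.Dict String Int),
      List.foldl
        (fun habiRetornar hc =>
          if (hc.2 == 0) = true then
            habiRetornar.insert cd.1 ((habiRetornar.getD cd.1 PySem.Set.empty).add hc.1)
          else habiRetornar)
        (hr.insert cd.1 PySem.Set.empty) cd.2.items
      = hr.insert cd.1 (uniqSetOf cd.2) := by
    intro hr cd
    exact foldl_insert_fun_collapse cd.2.items
      (fun habiRetornar hc =>
        if (hc.2 == 0) = true then
          habiRetornar.insert cd.1 ((habiRetornar.getD cd.1 PySem.Set.empty).add hc.1)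
        else habiRetornar)
      (fun hc s => if (hc.2 == 0) = true then PySem.Set.add s hc.1 else s) cd.1
      (by
        intro base v hc
        by_cases hq : (hc.2 == 0) = true
        · simp only [hq, if_true, PySem.Dict.getD_insert_self, PySem.Dict.insert_insert_self]
        · simp only [if_neg hq])
      hr PySem.Set.empty
  have hs2 :
      List.foldl
        (fun habiRetornar cd =>
          List.foldl
            (fun habiRetornar hc =>
              if (hc.2 == 0) = true then
                habiRetornar.insert cd.1 ((habiRetornar.getD cd.1 PySem.Set.empty).add hc.1)
              else habiRetornar)
            (habiRetornar.insert cd.1 PySem.Set.empty) cd.2.items)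
        PySem.Dict.empty ((PySem.Dict.empty : PySem.Dict String (PySem.Dict String Int)).items ++ List.map (fun cl => (cl.1, innerA hd.items cl.1 cl.2)) hd.items)
      = List.foldl (fun hr cd => hr.insert cd.1 (uniqSetOf cd.2)) PySem.Dict.empty
          ((PySem.Dict.empty : PySem.Dict String (PySem.Dict String Int)).items ++ List.map (fun cl => (cl.1, innerA hd.items cl.1 cl.2)) hd.items) :=
    PySem.List.foldl_congr_mem _ _ _ _ (fun hr cd _ => hstep2 hr cd)
  rw [hs2]
  have hnd2 : ((((PySem.Dict.empty : PySem.Dict String (PySem.Dict String Int)).items ++ List.map (fun cl => (cl.1, innerA hd.items cl.1 cl.2)) hd.items)).map (fun cd => cd.1)).Nodup := by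
    simpa [PySem.Dict.empty, List.map_map, Function.comp_def] using hnd'
  rw [PySem.Dict.items_foldl_insert_fresh
    ((PySem.Dict.empty : PySem.Dict String (PySem.Dict String Int)).items ++ List.map (fun cl => (cl.1, innerA hd.items cl.1 cl.2)) hd.items)
    (fun cd => cd.1) (fun cd => uniqSetOf cd.2) PySem.Dict.empty (fun a _ => by simp) hnd2]
  simp [PySem.Dict.empty, List.map_map, Function.comp_def]

-- A's top-level loop, characterized
theorem portA_items (terroristas habilidades : List (String × List String)) :
    terroristasPeligrosos terroristas habilidades
      = (((PySem.Dict.ofList habilidades).items.filter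
            (fun p => decide (¬ ((uniqSetOf (innerA (PySem.Dict.ofList habilidades).items p.1 p.2)).length = 0)))).map
          (fun p => (p.1, dangA (PySem.Dict.ofList terroristas) p.1))) := by
  unfold terroristasPeligrosos
  dsimp only
  set td := PySem.Dict.ofList terroristas with htd
  set hd := PySem.Dict.ofList habilidades with hhd
  rw [habUni_items hd (PySem.Dict.nodup_keys_ofList habilidades)]
  have bdang : ∀ (pel : PySem.Dict String Bool) (cc : String × PySem.Set String),
      List.foldl
        (fun peligrosos otro =>
          if (cc.1 != otro && seConocen td cc.1 otro) = true then peligrosos.insert cc.1 false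
          else peligrosos)
        (pel.insert cc.1 true) td.keys
      = pel.insert cc.1 (dangA td cc.1) := by
    intro pel cc
    rw [foldl_insert_fun_collapse td.keys
        (fun peligrosos otro =>
          if (cc.1 != otro && seConocen td cc.1 otro) = true then peligrosos.insert cc.1 false
          else peligrosos)
        (fun otro b => if (cc.1 != otro && seConocen td cc.1 otro) = true then false else b)
        cc.1
        (by
          intro base v otro
          by_cases hc : (cc.1 != otro && seConocen td cc.1 otro) = true
          · simp only [if_pos hc, PySem.Dict.insert_insert_self]
          · simp only [if_neg hc])
        pel true]
    rw [PySem.List.foldl_if_false_eq (fun otro => cc.1 != otro && seConocen td cc.1 otro) td.keys true]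
    rw [Bool.true_and]
    rfl
  have hbf :
      List.foldl
        (fun peligrosos cc =>
          if List.length cc.2 ≠ 0 then
            List.foldl
              (fun peligrosos otro =>
                if (cc.1 != otro && seConocen td cc.1 otro) = true then peligrosos.insert cc.1 false else peligrosos)
              (peligrosos.insert cc.1 true) td.keys
          else peligrosos)
        PySem.Dict.empty (List.map (fun p => (p.1, uniqSetOf (innerA hd.items p.1 p.2))) hd.items)
      = List.foldl
          (fun (pel : PySem.Dict String Bool) (cc : String × PySem.Set String) =>
            if List.length cc.2 ≠ 0 then pel.insert cc.1 (dangA td cc.1) else pel)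
          PySem.Dict.empty (List.map (fun p => (p.1, uniqSetOf (innerA hd.items p.1 p.2))) hd.items) :=
    PySem.List.foldl_congr_mem _ _ _ _ (fun pel cc _ => by
      by_cases hc : List.length cc.2 ≠ 0
      · simp only [if_pos hc, bdang]
      · simp only [if_neg hc])
  rw [hbf]
  rw [PySem.List.foldl_ite_eq_foldl_filter (fun (cc : String × PySem.Set String) => List.length cc.2 ≠ 0)
    (fun (pel : PySem.Dict String Bool) cc => pel.insert cc.1 (dangA td cc.1))]
  rw [PySem.Dict.items_foldl_insert_fresh
    (List.filter (fun x => decide (List.length x.2 ≠ 0))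
      (List.map (fun p => (p.1, uniqSetOf (innerA hd.items p.1 p.2))) hd.items))
    (fun cc => cc.1) (fun cc => dangA td cc.1)
    PySem.Dict.empty (fun a _ => by simp)
    (by
      refine List.Nodup.sublist (List.Sublist.map _ List.filter_sublist) ?_
      have h0 : (hd.items.map (fun p => p.1)).Nodup := PySem.Dict.nodup_keys_ofList habilidades
      simpa [List.map_map, Function.comp_def] using h0)]
  rw [List.filter_map, List.map_map]
  simp [PySem.Dict.empty, Function.comp_def]

theorem guarded_insert_items {κ ν β : Type} [BEq κ] [LawfulBEq κ]
    (l : List (κ × β)) (p : κ × β → Bool) (V : κ → ν) (hnd : (l.map (·.1)).Nodup) :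
    (l.foldl (fun d cs => if p cs then d.insert cs.1 (V cs.1) else d) PySem.Dict.empty).items
      = (l.filter p).map (fun cs => (cs.1, V cs.1)) := by
  rw [PySem.List.foldl_if_eq_foldl_filter]
  rw [PySem.Dict.items_foldl_insert_fresh (l.filter p) (fun cs => cs.1) (fun cs => V cs.1)
    PySem.Dict.empty (fun a _ => by simp)
    (hnd.sublist (List.Sublist.map _ List.filter_sublist))]
  simp [PySem.Dict.empty]

theorem portB_items (terroristas habilidades : List (String × List String)) :
    terroristasPeligrosos_alt terroristas habilidades
      = (((PySem.Dict.ofList habilidades).items.filter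
            (fun cs => cs.2.any (fun h =>
              ((PySem.Dict.ofList habilidades).items.countP (fun q => q.2.contains h) : Int) == 1))).map
          (fun cs => (cs.1, dangB (PySem.Dict.ofList terroristas) cs.1))) := by
  unfold terroristasPeligrosos_alt
  dsimp only
  set td := PySem.Dict.ofList terroristas with htd
  set hd := PySem.Dict.ofList habilidades with hhd
  have hb : ∀ (acc : PySem.Dict String Bool) (cs : String × List String),
      (if (cs.2.any fun h =>
            (List.foldl (fun owners cs =>
                List.foldl (fun owners h => owners.modify h 0 fun x => x + 1) owners
                  (PySem.Set.ofList cs.2)) (PySem.Dict.empty : PySem.Dict String Int) hd.items).getD h 0 == 1) = true then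
        acc.insert cs.1
          ((td.getD cs.1 []).all fun h =>
            ((List.foldl (fun index cs =>
                List.foldl (fun index h => index.modify h PySem.Set.empty fun s => s.add cs.1)
                  index cs.2) (PySem.Dict.empty : PySem.Dict String (PySem.Set String)) td.items).getD h PySem.Set.empty).issubset [cs.1])
      else acc)
      = (if (cs.2.any fun h => ((hd.items.countP (fun q => q.2.contains h) : Int)) == 1) = true then
          acc.insert cs.1 (dangB td cs.1) else acc) := by
    intro acc cs
    have hcond : ∀ h : String,
        ((List.foldl (fun owners cs =>
            List.foldl (fun owners h => owners.modify h 0 fun x => x + 1) owners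
              (PySem.Set.ofList cs.2)) (PySem.Dict.empty : PySem.Dict String Int) hd.items).getD h 0 == 1)
        = (((hd.items.countP (fun q => q.2.contains h) : Int)) == 1) := by
      intro h
      rw [owners_getD]
      simp
    have hval : ∀ h : String,
        ((List.foldl (fun index cs =>
            List.foldl (fun index h => index.modify h PySem.Set.empty fun s => s.add cs.1)
              index cs.2) (PySem.Dict.empty : PySem.Dict String (PySem.Set String)) td.items).getD h PySem.Set.empty)
        = PySem.Set.ofList ((td.items.filter (fun q => q.2.contains h)).map (fun q => q.1)) := by
      intro h
      rw [index_getD, ← foldl_set_add_ofList (td.items.filter (fun q => q.2.contains h)) (fun q => q.1)]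
      simp [PySem.Set.empty]
    simp only [hcond, hval, dangB]
  have hfold :
      List.foldl (fun (result : PySem.Dict String Bool) cs =>
        if (cs.2.any fun h =>
            (List.foldl (fun owners cs =>
                List.foldl (fun owners h => owners.modify h 0 fun x => x + 1) owners
                  (PySem.Set.ofList cs.2)) (PySem.Dict.empty : PySem.Dict String Int) hd.items).getD h 0 == 1) = true then
          result.insert cs.1
            ((td.getD cs.1 []).all fun h =>
              ((List.foldl (fun index cs =>
                  List.foldl (fun index h => index.modify h PySem.Set.empty fun s => s.add cs.1)
                    index cs.2) (PySem.Dict.empty : PySem.Dict String (PySem.Set String)) td.items).getD h PySem.Set.empty).issubset [cs.1])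
        else result) PySem.Dict.empty hd.items
      = List.foldl (fun (acc : PySem.Dict String Bool) cs =>
          if (cs.2.any fun h => ((hd.items.countP (fun q => q.2.contains h) : Int)) == 1) = true then
            acc.insert cs.1 (dangB td cs.1) else acc) PySem.Dict.empty hd.items :=
    PySem.List.foldl_congr_mem _ _ _ _ (fun acc cs _ => hb acc cs)
  rw [hfold, guarded_insert_items _ _ _ (PySem.Dict.nodup_keys_ofList habilidades)]

theorem countP_split_key : ∀ (L : List (String × List String)), ((L.map (fun x => x.1)).Nodup) →
    ∀ p ∈ L, ∀ hab ∈ p.2,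
    L.countP (fun q => q.2.contains hab)
      = L.countP (fun c2 => p.1 != c2.1 && c2.2.contains hab) + 1 := by
  intro L
  induction L with
  | nil => simp
  | cons a t ih =>
    intro hnd p hp hab hmem
    simp only [List.map_cons, List.nodup_cons] at hnd
    obtain ⟨ha1, hndt⟩ := hnd
    rcases List.mem_cons.mp hp with rfl | hpt
    · have hcongr : t.countP (fun q => q.2.contains hab)
          = t.countP (fun c2 => p.1 != c2.1 && c2.2.contains hab) := by
        apply List.countP_congr
        intro q hq
        have hne : ¬ p.1 = q.1 := fun he => ha1 (he ▸ List.mem_map_of_mem hq)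
        simp [hne]
      simp only [List.countP_cons, hcongr]
      simp [hmem]
    · have hne : ¬ p.1 = a.1 := by
        intro he
        exact ha1 (he ▸ List.mem_map_of_mem hpt)
      have hne' : (p.1 != a.1) = true := by simpa [bne_iff_ne] using hne
      have hstep := ih hndt p hpt hab hmem
      simp only [List.countP_cons, hne', Bool.true_and, hstep]
      omega

-- the uniqueness conditions agree on every entry of a nodup-key item list
theorem cond_eq (L : List (String × List String)) (hnd : (L.map (·.1)).Nodup)
    (p : String × List String) (hp : p ∈ L) :
    decide (¬ ((uniqSetOf (innerA L p.1 p.2)).length = 0))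
      = p.2.any (fun h => ((L.countP (fun q => q.2.contains h) : Int)) == 1) := by
  have hitems : (innerA L p.1 p.2).items
      = (PySem.Set.ofList p.2).map (fun hab => (hab, cntOthers L p.1 hab)) := by
    unfold innerA
    rw [items_foldl_insert_keyfun p.2 (fun hab => cntOthers L p.1 hab) [] PySem.Dict.empty
      rfl List.nodup_nil, set_update_nil]
  have huniq : uniqSetOf (innerA L p.1 p.2)
      = PySem.Set.ofList ((((PySem.Set.ofList p.2).map (fun hab => (hab, cntOthers L p.1 hab))).filter
          (fun hc => hc.2 == 0)).map (fun hc => hc.1)) := by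
    unfold uniqSetOf
    rw [hitems]
    refine Eq.trans (PySem.List.foldl_if_eq_foldl_filter (fun (hc : String × Int) => hc.2 == 0)
      (fun s hc => PySem.Set.add s hc.1) _ PySem.Set.empty) ?_
    exact foldl_set_add_ofList _ _
  refine Bool.coe_iff_coe.mp ?_
  rw [decide_eq_true_eq, huniq, List.any_eq_true]
  constructor
  · intro hne
    have hnil : ¬ (PySem.Set.ofList ((((PySem.Set.ofList p.2).map (fun hab => (hab, cntOthers L p.1 hab))).filter
        (fun hc => hc.2 == 0)).map (fun hc => hc.1))) = [] := by
      intro h0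
      exact hne (by rw [h0]; rfl)
    rw [ofList_eq_nil_iff] at hnil
    obtain ⟨x, hx⟩ := List.exists_mem_of_ne_nil _ hnil
    obtain ⟨hc, hcmem, rfl⟩ := List.mem_map.mp hx
    obtain ⟨hcmem2, hcz⟩ := List.mem_filter.mp hcmem
    obtain ⟨hab, habmem, rfl⟩ := List.mem_map.mp hcmem2
    have habl : hab ∈ p.2 := (PySem.Set.mem_ofList _ _).mp habmem
    refine ⟨hab, habl, ?_⟩
    have hz : cntOthers L p.1 hab = 0 := by simpa using hcz
    have hsplit := countP_split_key L hnd p hp hab habl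
    rw [beq_iff_eq]
    unfold cntOthers at hz
    have : L.countP (fun c2 => p.1 != c2.1 && c2.2.contains hab) = 0 := by exact_mod_cast hz
    rw [hsplit, this]
    rfl
  · intro ⟨h, hh, hbeq⟩ hlen
    have hsplit := countP_split_key L hnd p hp h hh
    have h1 : L.countP (fun q => q.2.contains h) = 1 := by
      have := beq_iff_eq.mp hbeq
      exact_mod_cast this
    have hz : cntOthers L p.1 h = 0 := by
      unfold cntOthers
      have : L.countP (fun c2 => p.1 != c2.1 && c2.2.contains h) = 0 := by omega
      exact_mod_cast congrArg (Nat.cast : Nat → Int) this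
    have hxmem : h ∈ (((PySem.Set.ofList p.2).map (fun hab => (hab, cntOthers L p.1 hab))).filter
        (fun hc => hc.2 == 0)).map (fun hc => hc.1) := by
      refine List.mem_map.mpr ⟨(h, cntOthers L p.1 h), ?_, rfl⟩
      refine List.mem_filter.mpr ⟨?_, by simp [hz]⟩
      exact List.mem_map.mpr ⟨h, (PySem.Set.mem_ofList _ _).mpr hh, rfl⟩
    have : h ∈ PySem.Set.ofList ((((PySem.Set.ofList p.2).map (fun hab => (hab, cntOthers L p.1 hab))).filter
        (fun hc => hc.2 == 0)).map (fun hc => hc.1)) := (PySem.Set.mem_ofList _ _).mpr hxmem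
    rw [List.length_eq_zero_iff] at hlen
    rw [hlen] at this
    simp at this

-- the dangerousness values agree for every code
theorem dang_eq (td : PySem.Dict String (List String)) (hnd : td.keys.Nodup) (cod : String) :
    dangA td cod = dangB td cod := by
  refine Bool.coe_iff_coe.mp ?_
  unfold dangA dangB
  by_cases hc : td.contains cod = true
  · have hkeys : ∀ otro, otro ∈ td.keys → td.contains otro = true :=
      fun otro ho => (PySem.Dict.contains_iff_mem_keys td otro).mpr ho
    have hsc2 : ∀ otro, otro ∈ td.keys →
        seConocen td cod otro = (td.getD cod []).any (fun i => (td.getD otro []).contains i) := by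
      intro otro ho
      unfold seConocen
      simp [hc, hkeys otro ho]
    simp only [Bool.not_eq_eq_eq_not, Bool.not_true, List.any_eq_false, List.all_eq_true]
    constructor
    · intro hA h hh
      rw [show PySem.Set.issubset (PySem.Set.ofList ((td.items.filter (fun q => q.2.contains h)).map (fun q => q.1))) [cod]
          = (PySem.Set.ofList ((td.items.filter (fun q => q.2.contains h)).map (fun q => q.1))).all
              (fun x => [cod].contains x) from rfl, List.all_eq_true]
      intro x hx
      obtain ⟨q, hqmem, rfl⟩ := List.mem_map.mp ((PySem.Set.mem_ofList _ _).mp hx)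
      obtain ⟨hq, hqh⟩ := List.mem_filter.mp hqmem
      by_contra hne
      have hqk : q.1 ∈ td.keys := List.mem_map_of_mem hq
      have hAq := hA q.1 hqk
      have hbne : (cod != q.1) = true := by
        simp only [bne_iff_ne]
        intro he
        apply hne
        simp [← he]
      rw [hsc2 q.1 hqk] at hAq
      have hgq : td.getD q.1 [] = q.2 := PySem.Dict.getD_of_mem_items td hq hnd []
      have : ((td.getD cod []).any (fun i => (td.getD q.1 []).contains i)) = true := by
        rw [List.any_eq_true]
        exact ⟨h, hh, by rw [hgq]; exact hqh⟩
      rw [hbne, this] at hAq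
      simp at hAq
    · intro hB otro ho
      by_cases he : cod = otro
      · simp [he]
      · have hbne : (cod != otro) = true := by simpa [bne_iff_ne] using he
        rw [hbne, hsc2 otro ho, Bool.true_and]
        intro hany
        obtain ⟨i, hi, hic⟩ := List.any_eq_true.mp hany
        obtain ⟨q, hq, rfl⟩ := List.mem_map.mp ho
        have hgq : td.getD q.1 [] = q.2 := PySem.Dict.getD_of_mem_items td hq hnd []
        rw [hgq] at hic
        have hiq : i ∈ q.2 := by simpa [List.contains_iff_mem] using hic
        have hBi := hB i hi
        rw [show PySem.Set.issubset (PySem.Set.ofList ((td.items.filter (fun q => q.2.contains i)).map (fun q => q.1))) [cod]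
            = (PySem.Set.ofList ((td.items.filter (fun q => q.2.contains i)).map (fun q => q.1))).all
                (fun x => [cod].contains x) from rfl, List.all_eq_true] at hBi
        have hqf : q ∈ td.items.filter (fun q => q.2.contains i) :=
          List.mem_filter.mpr ⟨hq, by simpa [List.contains_iff_mem] using hiq⟩
        have := hBi q.1 ((PySem.Set.mem_ofList _ _).mpr (List.mem_map_of_mem hqf))
        simp at this
        exact he (by simp [this])
  · have hcf : td.contains cod = false := by simpa using hc
    have hg : td.getD cod [] = [] := PySem.Dict.getD_of_not_contains td [] hcf
    have hsc : ∀ otro, seConocen td cod otro = false := by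
      intro otro
      unfold seConocen
      simp [hcf]
    simp [hg, hsc]

theorem equiv_main (terroristas habilidades : List (String × List String)) :
    terroristasPeligrosos terroristas habilidades = terroristasPeligrosos_alt terroristas habilidades := by
  rw [portA_items, portB_items]
  have hndh : ((PySem.Dict.ofList habilidades).items.map (·.1)).Nodup :=
    PySem.Dict.nodup_keys_ofList habilidades
  have hndt : (PySem.Dict.ofList terroristas).keys.Nodup :=
    PySem.Dict.nodup_keys_ofList terroristas
  rw [List.filter_congr (fun p hp => cond_eq _ hndh p hp)]
  exact List.map_congr_left (fun p _ => by rw [dang_eq _ hndt])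

-- ===== VERDICT (by name: the statement is the Claim_ definition above) =====
theorem terroristasPeligrosos_spec : Claim_equal_terroristasPeligrosos := by
  intro t h _
  unfold Spec_terroristasPeligrosos
  exact equiv_main t h
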